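-- pv_equiv track=rewrite | github.com/ainaosyusi/NLH-PokerAI-project | brain/personality_agents.py | _get_valid_action
-- ===== SOURCE A (Python) =====
-- from typing import List, Dict, Optional, Tuple
--
-- def _get_valid_action(action_mask: List[bool], prefer_passive: bool = False) -> int:
--     """Get a valid action from mask."""
--     if prefer_passive:
--         # Prefer check/call > fold > raise > all-in
--         order = [1, 0, 2, 3]
--     else:
--         # Prefer raise > call > fold > all-in
--         order = [2, 1, 0, 3]
--
--     for action in order:
--         if action < len(action_mask) and action_mask[action]:
--             return action
--
--     # Fallback to any valid action
--     for i, valid in enumerate(action_mask):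
--         if valid:
--             return i
--     return 0
-- ===== SOURCE B (Python) =====
-- def _get_valid_action(action_mask, prefer_passive=False):
--     """Get a valid action from mask.
--
--     Single pass computing the argmin of a numeric priority key over all valid
--     indices: preferred actions (0..3) get their rank in the preference order as
--     key, any higher index i gets key 4 + i (so preferred valid actions always
--     beat higher ones, and higher ones are tie-broken ascending). Returns 0 if
--     nothing is valid.
--     """
--     rank = {1: 0, 0: 1, 2: 2, 3: 3} if prefer_passive else {2: 0, 1: 1, 0: 2, 3: 3}
--     best_key = None
--     best_i = 0
--     for i, valid in enumerate(action_mask):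
--         if valid:
--             k = rank[i] if i < 4 else 4 + i
--             if best_key is None or k < best_key:
--                 best_key, best_i = k, i
--     return best_i
-- ===== Notes on version B (the rewrite author's own statement) =====
-- stated objective: alternative
-- what changed: Replaces A's two staged scans (preference-order probe with early return, then ascending fallback scan) with a single pass over the mask that keeps an argmin accumulator of a numeric priority key (preference rank for indices 0..3, 4+i for higher indices).
import Mathlib
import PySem

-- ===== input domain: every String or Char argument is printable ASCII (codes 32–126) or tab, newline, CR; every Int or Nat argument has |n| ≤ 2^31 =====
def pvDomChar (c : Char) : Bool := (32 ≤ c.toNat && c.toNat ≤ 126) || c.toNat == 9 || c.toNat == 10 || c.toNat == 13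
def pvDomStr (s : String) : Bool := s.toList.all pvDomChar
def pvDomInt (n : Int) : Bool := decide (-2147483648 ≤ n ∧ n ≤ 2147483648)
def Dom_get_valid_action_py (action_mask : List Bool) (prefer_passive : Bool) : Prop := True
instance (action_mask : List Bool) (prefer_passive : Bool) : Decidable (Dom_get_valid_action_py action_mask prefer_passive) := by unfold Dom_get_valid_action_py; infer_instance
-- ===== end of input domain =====

-- B replaces A's two staged scans (preference probe then ascending fallback) by a single pass
-- keeping an argmin accumulator over a numeric priority key; objective: alternative, same O(n).

-- ===== PORT A =====
-- the preference loop: first in-range index of `order` whose mask entry is true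
def pvFindOrderA (mask : List Bool) : List Nat → Option Nat
  | [] => none
  | a :: rest => if a < mask.length ∧ mask.getD a false then some a else pvFindOrderA mask rest

-- the fallback loop: `for i, valid in enumerate(action_mask): if valid: return i` then `return 0`
def pvFallbackA : List Bool → Nat → Int
  | [], _ => 0
  | v :: rest, i => if v then (i : Int) else pvFallbackA rest (i + 1)

def get_valid_action_py (action_mask : List Bool) (prefer_passive : Bool) : Int :=
  let order : List Nat := if prefer_passive then [1, 0, 2, 3] else [2, 1, 0, 3]
  match pvFindOrderA action_mask order with
  | some a => (a : Int)
  | none => pvFallbackA action_mask 0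

-- ===== PORT B =====
-- the key `rank[i] if i < 4 else 4 + i`; the dict-literal lookup rank[i] is ported as an
-- if-chain (exact: the dict's keys 0,1,2,3 cover every i < 4 reached here, i ≥ 0 from enumerate)
def pvKeyB (pp : Bool) (i : Nat) : Nat :=
  if i < 4 then
    (if pp then (if i = 1 then 0 else if i = 0 then 1 else if i = 2 then 2 else 3)
     else (if i = 2 then 0 else if i = 1 then 1 else if i = 0 then 2 else 3))
  else 4 + i

-- the single pass: state (best_key, best_i), argmin of the key over valid indices
def pvLoopB (pp : Bool) : List Bool → Nat → Option Nat → Nat → Nat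
  | [], _, _, bi => bi
  | v :: rest, i, bk, bi =>
    if v then
      let k := pvKeyB pp i
      match bk with
      | none => pvLoopB pp rest (i + 1) (some k) i
      | some b => if k < b then pvLoopB pp rest (i + 1) (some k) i
                  else pvLoopB pp rest (i + 1) (some b) bi
    else pvLoopB pp rest (i + 1) bk bi

def get_valid_action_py_alt (action_mask : List Bool) (prefer_passive : Bool) : Int :=
  (pvLoopB prefer_passive action_mask 0 none 0 : Int)

-- ===== PRECONDITION & SPEC =====
def Spec_get_valid_action_py (action_mask : List Bool) (prefer_passive : Bool) (out : Int) : Prop := out = get_valid_action_py_alt action_mask prefer_passive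
instance (action_mask : List Bool) (prefer_passive : Bool) (out : Int) : Decidable (Spec_get_valid_action_py action_mask prefer_passive out) := by unfold Spec_get_valid_action_py; infer_instance

-- ===== CLAIM (what is proved, stated in full; the proofs are below) =====
def Claim_equal_get_valid_action_py : Prop := ∀ (action_mask : List Bool) (prefer_passive : Bool), Dom_get_valid_action_py action_mask prefer_passive → Spec_get_valid_action_py action_mask prefer_passive (get_valid_action_py action_mask prefer_passive)

-- ===== LEMMAS AND PROOFS =====

-- first true index at position ≥ i (used to characterise both fallbacks)
def pvFirstTrue : List Bool → Nat → Option Nat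
  | [], _ => none
  | v :: rest, i => if v then some i else pvFirstTrue rest (i + 1)

-- once a best key b < 4 + i is held and i ≥ 4, no later entry can improve it
theorem pvL1 (pp : Bool) : ∀ (rest : List Bool) (i b bi : Nat), 4 ≤ i → b < 4 + i →
    pvLoopB pp rest i (some b) bi = bi := by
  intro rest
  induction rest with
  | nil => intro i b bi _ _; rfl
  | cons v tail ih =>
    intro i b bi h4 hb
    cases v with
    | false => simpa [pvLoopB] using ih (i + 1) b bi (by omega) (by omega)
    | true =>
      have hk : pvKeyB pp i = 4 + i := by simp [pvKeyB, show ¬ i < 4 by omega]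
      simp [pvLoopB, hk, show ¬ 4 + i < b by omega]
      exact ih (i + 1) b bi (by omega) (by omega)

-- with no best yet and index ≥ 4, the loop returns the first true index (or bi)
theorem pvL2 (pp : Bool) : ∀ (rest : List Bool) (i bi : Nat), 4 ≤ i →
    pvLoopB pp rest i none bi = (pvFirstTrue rest i).getD bi := by
  intro rest
  induction rest with
  | nil => intro i bi _; rfl
  | cons v tail ih =>
    intro i bi h4
    cases v with
    | false => simpa [pvLoopB, pvFirstTrue] using ih (i + 1) bi (by omega)
    | true =>
      have hk : pvKeyB pp i = 4 + i := by simp [pvKeyB, show ¬ i < 4 by omega]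
      simp [pvLoopB, pvFirstTrue, hk]
      exact pvL1 pp tail (i + 1) (4 + i) i (by omega) (by omega)

-- A's fallback returns the first true index (or 0)
theorem pvL3 : ∀ (rest : List Bool) (i : Nat),
    pvFallbackA rest i = (((pvFirstTrue rest i).getD 0 : Nat) : Int) := by
  intro rest
  induction rest with
  | nil => intro i; rfl
  | cons v tail ih =>
    intro i
    cases v with
    | false => simpa [pvFallbackA, pvFirstTrue] using ih (i + 1)
    | true => simp [pvFallbackA, pvFirstTrue]

-- masks of length ≥ 4: split off the first four entries and bash the 32 boolean cases
theorem pvMainLong (pp a b c d : Bool) (rest : List Bool) :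
    get_valid_action_py (a :: b :: c :: d :: rest) pp =
      get_valid_action_py_alt (a :: b :: c :: d :: rest) pp := by
  have h0 : (0 : Nat) < rest.length + 4 := by omega
  have h1 : (1 : Nat) < rest.length + 4 := by omega
  have h2 : (2 : Nat) < rest.length + 4 := by omega
  have h3 : (3 : Nat) < rest.length + 4 := by omega
  cases pp <;> cases a <;> cases b <;> cases c <;> cases d <;>
    simp [get_valid_action_py, get_valid_action_py_alt, pvFindOrderA, pvLoopB, pvKeyB,
      pvFallbackA, h0, h1, h2, h3, List.getD,
      pvL1 _ rest 4, pvL2 _ rest 4, pvL3 rest 4]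

-- ===== VERDICT (by name: the statement is the Claim_ definition above) =====
theorem get_valid_action_py_spec : Claim_equal_get_valid_action_py := by
  intro mask pp _
  unfold Spec_get_valid_action_py
  match mask with
  | [] => revert pp; decide
  | [a] => revert a pp; decide
  | [a, b] => revert a b pp; decide
  | [a, b, c] => revert a b c pp; decide
  | a :: b :: c :: d :: rest => exact pvMainLong pp a b c d rest
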